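-- pv_equiv track=rewrite | github.com/HenryChinask1/AdventOfCode | 2021/2021day3part2.py | checkMin
-- ===== SOURCE A (Python) =====
-- def checkMin(bits:list, pos:int) -> list:
--     # Check for the min bits in the curr pos and return a list of values that comply.
--     ones = 0
--     zeros = 0
--     goodBits = []
--     for i in bits:
--         if i[pos] == '1':
--             ones += 1
--         elif i[pos] == '0':
--             zeros += 1
--     bit = '0' if min(ones, zeros) == zeros else '1'
--
--     for i in bits:
--         if i[pos] == bit:
--             goodBits.append(i)
--     return goodBits
-- ===== SOURCE B (Python) =====
-- def checkMin(bits: list, pos: int) -> list: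
--     # Single pass: partition the strings into the two buckets and return the smaller one.
--     zeros = []
--     ones = []
--     for i in bits:
--         c = i[pos]
--         if c == '0':
--             zeros.append(i)
--         elif c == '1':
--             ones.append(i)
--     return zeros if len(zeros) <= len(ones) else ones
-- ===== Notes on version B (the rewrite author's own statement) =====
-- stated objective: simpler
-- what changed: Replaces the count-then-refilter two-pass algorithm by a single-pass partition into the actual zeros/ones buckets, returning the smaller bucket directly (zeros on ties, as A).
import Mathlib
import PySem

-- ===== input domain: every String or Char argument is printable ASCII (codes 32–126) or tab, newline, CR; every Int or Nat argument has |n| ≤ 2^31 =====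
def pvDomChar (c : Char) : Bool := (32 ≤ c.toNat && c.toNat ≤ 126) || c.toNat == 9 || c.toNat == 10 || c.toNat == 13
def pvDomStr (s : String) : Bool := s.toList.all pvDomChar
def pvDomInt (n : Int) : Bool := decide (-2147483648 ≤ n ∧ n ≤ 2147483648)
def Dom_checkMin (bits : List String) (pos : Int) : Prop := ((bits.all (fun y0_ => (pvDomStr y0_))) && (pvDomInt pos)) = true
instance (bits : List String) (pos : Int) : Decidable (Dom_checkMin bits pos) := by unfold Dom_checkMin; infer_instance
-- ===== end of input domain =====

-- B replaces A's count-then-refilter two passes by a single-pass partition into the two buckets, returning the smaller one (simpler).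


-- ===== PORT A =====
def checkMin (bits : List String) (pos : Int) : List String :=
  -- first pass: count ones and zeros at position pos (if/elif chain)
  let oz : Int × Int := bits.foldl (fun oz i =>
    if PySem.Str.pyGet? i pos == some '1' then (oz.1 + 1, oz.2)
    else if PySem.Str.pyGet? i pos == some '0' then (oz.1, oz.2 + 1)
    else oz) (0, 0)
  let bit : Char := if min oz.1 oz.2 == oz.2 then '0' else '1'
  -- second pass: collect the strings whose pos-th char is the minority bit
  bits.foldl (fun goodBits i =>
    if PySem.Str.pyGet? i pos == some bit then goodBits ++ [i] else goodBits) []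

-- ===== PORT B =====
def checkMin_alt (bits : List String) (pos : Int) : List String :=
  -- single pass: partition into the zeros and ones buckets
  let zo : List String × List String := bits.foldl (fun zo i =>
    if PySem.Str.pyGet? i pos == some '0' then (zo.1 ++ [i], zo.2)
    else if PySem.Str.pyGet? i pos == some '1' then (zo.1, zo.2 ++ [i])
    else zo) ([], [])
  if zo.1.length ≤ zo.2.length then zo.1 else zo.2

-- ===== PRECONDITION & SPEC =====
-- Pre_ excludes exactly the inputs where some string has no character at index pos: Python A raises IndexError there (so does B).
def Pre_checkMin (bits : List String) (pos : Int) : Prop :=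
  ∀ s ∈ bits, PySem.Raise.InRange s.toList.length pos
instance (bits : List String) (pos : Int) : Decidable (Pre_checkMin bits pos) := by
  unfold Pre_checkMin; infer_instance
def pvWitness_checkMin : List String × Int := (["01", "10", "11"], 1)
def Spec_checkMin (bits : List String) (pos : Int) (out : List String) : Prop := out = checkMin_alt bits pos
instance (bits : List String) (pos : Int) (out : List String) : Decidable (Spec_checkMin bits pos out) := by unfold Spec_checkMin; infer_instance

-- ===== CLAIM (what is proved, stated in full; the proofs are below) =====
def Claim_equal_checkMin : Prop := ∀ (bits : List String) (pos : Int), Dom_checkMin bits pos → Pre_checkMin bits pos → Spec_checkMin bits pos (checkMin bits pos)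

-- ===== LEMMAS AND PROOFS =====

-- B's partition fold computes the two filtered buckets.
theorem alt_fold_eq_filters (bits : List String) (pos : Int) (z o : List String) :
    bits.foldl (fun zo i =>
      if PySem.List.pyGet? i.toList pos == some '0' then (zo.1 ++ [i], zo.2)
      else if PySem.List.pyGet? i.toList pos == some '1' then (zo.1, zo.2 ++ [i])
      else zo) (z, o)
    = (z ++ bits.filter (fun i => PySem.List.pyGet? i.toList pos == some '0'),
       o ++ bits.filter (fun i => PySem.List.pyGet? i.toList pos == some '1')) := by
  induction bits generalizing z o with
  | nil => simp
  | cons s t ih =>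
    simp only [List.foldl_cons, List.filter_cons]
    by_cases h0 : (PySem.List.pyGet? s.toList pos == some '0') = true
    · have h1 : ¬ ((PySem.List.pyGet? s.toList pos == some '1') = true) := by simp_all
      rw [if_pos h0, if_neg h1, ih]
      simp_all
    · by_cases h1 : (PySem.List.pyGet? s.toList pos == some '1') = true
      · rw [if_neg h0, if_pos h1, ih]
        simp_all
      · rw [if_neg h0, if_neg h1, ih]
        simp_all

-- A's counting fold computes the integer sizes of the two buckets.
theorem count_fold_eq_lengths (bits : List String) (pos : Int) (a b : Int) :
    bits.foldl (fun oz i =>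
      if PySem.List.pyGet? i.toList pos == some '1' then ((oz.1 + 1 : Int), oz.2)
      else if PySem.List.pyGet? i.toList pos == some '0' then (oz.1, (oz.2 + 1 : Int))
      else oz) (a, b)
    = (a + (bits.filter (fun i => PySem.List.pyGet? i.toList pos == some '1')).length,
       b + (bits.filter (fun i => PySem.List.pyGet? i.toList pos == some '0')).length) := by
  induction bits generalizing a b with
  | nil => simp
  | cons s t ih =>
    simp only [List.foldl_cons, List.filter_cons]
    by_cases h1 : (PySem.List.pyGet? s.toList pos == some '1') = true
    · have h0 : ¬ ((PySem.List.pyGet? s.toList pos == some '0') = true) := by simp_all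
      rw [if_pos h1, if_neg h0, ih]
      simp_all
      omega
    · by_cases h0 : (PySem.List.pyGet? s.toList pos == some '0') = true
      · rw [if_neg h1, if_pos h0, ih]
        simp_all
        omega
      · rw [if_neg h1, if_neg h0, ih]
        simp_all

-- A's second pass with bit c is the filter by c (Str-typed corollary of the library loop-shape lemma).
theorem filter_pass_eq (bits : List String) (pos : Int) (c : Char) :
    bits.foldl (fun goodBits i =>
      if PySem.Str.pyGet? i pos == some c then goodBits ++ [i] else goodBits) []
    = bits.filter (fun i => PySem.List.pyGet? i.toList pos == some c) := by
  have h := PySem.List.foldl_append_if_eq_filter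
    (fun i => PySem.List.pyGet? i.toList pos == some c) bits []
  simp only [List.nil_append] at h
  exact h

-- ===== VERDICT (by name: the statement is the Claim_ definition above) =====
theorem checkMin_spec : Claim_equal_checkMin := by
  intro bits pos _ _
  unfold Spec_checkMin
  simp only [checkMin, checkMin_alt]
  have hzo :
      bits.foldl (fun zo i =>
        if PySem.Str.pyGet? i pos == some '0' then (zo.1 ++ [i], zo.2)
        else if PySem.Str.pyGet? i pos == some '1' then (zo.1, zo.2 ++ [i])
        else zo) (([], []) : List String × List String)
      = (bits.filter (fun i => PySem.List.pyGet? i.toList pos == some '0'),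
         bits.filter (fun i => PySem.List.pyGet? i.toList pos == some '1')) :=
    (alt_fold_eq_filters bits pos [] []).trans (by simp)
  have hoz :
      bits.foldl (fun oz i =>
        if PySem.Str.pyGet? i pos == some '1' then ((oz.1 + 1 : Int), oz.2)
        else if PySem.Str.pyGet? i pos == some '0' then (oz.1, (oz.2 + 1 : Int))
        else oz) ((0, 0) : Int × Int)
      = (((bits.filter (fun i => PySem.List.pyGet? i.toList pos == some '1')).length : Int),
         ((bits.filter (fun i => PySem.List.pyGet? i.toList pos == some '0')).length : Int)) :=
    (count_fold_eq_lengths bits pos 0 0).trans (by simp)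
  rw [hzo, hoz, filter_pass_eq]
  set f1 := (bits.filter (fun i => PySem.List.pyGet? i.toList pos == some '1')) with hf1
  set f0 := (bits.filter (fun i => PySem.List.pyGet? i.toList pos == some '0')) with hf0
  by_cases hle : f0.length ≤ f1.length
  · have hmin : (min ((f1.length : Int)) ((f0.length : Int)) == (f0.length : Int)) = true := by
      simp; omega
    rw [hmin, if_pos rfl, if_pos hle]
  · have hmin : (min ((f1.length : Int)) ((f0.length : Int)) == (f0.length : Int)) = false := by
      simp; omega
    rw [hmin, if_neg (by simp), if_neg hle]
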